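-- pv_equiv track=rewrite | github.com/abdulhathi/dsa-in-python | 03-array/14-frequencies-in-a-sorted-array/14-frequencies-in-a-sorted-array.py | frequencies_in_a_sorted_array
-- ===== SOURCE A (Python) =====
-- from typing import List
--
-- def frequencies_in_a_sorted_array(nums: List[int]) -> dict:
--   freq = [[nums[0], 1]]
--   for i in range(1, len(nums)):
--     if freq[len(freq)-1][0] != nums[i]:
--       freq.append([nums[i], 1])
--     else:
--       freq[len(freq)-1][1] += 1
--   return freq
-- ===== SOURCE B (Python) =====
-- from typing import List
--
-- def frequencies_in_a_sorted_array(nums: List[int]) -> dict: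
--   # Staged decomposition: first compute the run-boundary indices, then read each
--   # run length off as the difference of consecutive boundaries.
--   n = len(nums)
--   boundaries = [0] + [i for i in range(1, n) if nums[i] != nums[i - 1]] + [n]
--   return [[nums[boundaries[j]], boundaries[j + 1] - boundaries[j]]
--           for j in range(len(boundaries) - 1)]
-- ===== Notes on version B (the rewrite author's own statement) =====
-- stated objective: alternative
-- what changed: B replaces A's single forward pass that increments the last run's counter by two staged passes: it first computes the list of run-boundary indices (a leading zero, the change points, and the length), then emits each value/count pair with the count read off as the difference of consecutive boundaries; Pre_ excludes only the empty list, on which both A and B raise IndexError.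
import Mathlib
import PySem

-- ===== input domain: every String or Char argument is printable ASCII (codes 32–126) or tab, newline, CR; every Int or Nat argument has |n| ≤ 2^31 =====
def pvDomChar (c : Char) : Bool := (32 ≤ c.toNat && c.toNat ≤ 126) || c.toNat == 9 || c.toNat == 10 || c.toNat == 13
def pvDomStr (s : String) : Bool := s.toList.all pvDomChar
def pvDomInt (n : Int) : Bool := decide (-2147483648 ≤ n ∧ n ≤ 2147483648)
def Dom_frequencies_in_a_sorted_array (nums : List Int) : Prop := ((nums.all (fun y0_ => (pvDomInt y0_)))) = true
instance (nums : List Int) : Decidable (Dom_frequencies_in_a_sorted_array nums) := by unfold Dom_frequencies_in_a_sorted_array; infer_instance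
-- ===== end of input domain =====

-- B replaces A's single forward pass with an incremented counter by two staged passes:
-- it first computes the run-boundary indices, then reads each run length off as the
-- difference of consecutive boundaries ('alternative'; return values proved equal on
-- non-empty input; both programs raise IndexError on the empty list, excluded by Pre_).


-- ===== PORT A =====
-- one loop iteration of A: freq[len(freq)-1] is read, and the in-place
-- 'freq[len(freq)-1][1] += 1' is modeled as replacing the last element
def pvStepA (freq : List (List Int)) (x : Int) : List (List Int) :=
  let last := PySem.List.pyGetD freq ((PySem.List.len freq) - 1) []
  if PySem.List.pyGetD last 0 0 ≠ x then
    freq ++ [[x, 1]]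
  else
    freq.dropLast ++ [[PySem.List.pyGetD last 0 0, PySem.List.pyGetD last 1 0 + 1]]

def frequencies_in_a_sorted_array (nums : List Int) : List (List Int) :=
  -- freq = [[nums[0], 1]]; nums[0] raises IndexError on [], excluded by Pre_
  let freq0 : List (List Int) := [[PySem.List.pyGetD nums 0 0, 1]]
  (PySem.List.pyRange 1 (PySem.List.len nums) 1).foldl
    (fun freq i => pvStepA freq (PySem.List.pyGetD nums i 0)) freq0

-- ===== PORT B =====
def frequencies_in_a_sorted_array_alt (nums : List Int) : List (List Int) :=
  -- n = len(nums)
  let n := PySem.List.len nums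
  -- boundaries = list with 0, then every i in range(1, n) with nums[i] != nums[i-1], then n
  let boundaries : List Int :=
    [0] ++ ((PySem.List.pyRange 1 n 1).filter
      (fun i => PySem.List.pyGetD nums i 0 != PySem.List.pyGetD nums (i - 1) 0)) ++ [n]
  -- [[nums[boundaries[j]], boundaries[j+1] - boundaries[j]] for j in range(len(boundaries)-1)]
  -- (nums[boundaries[0]] raises IndexError on [], excluded by Pre_)
  (PySem.List.pyRange 0 (PySem.List.len boundaries - 1) 1).map
    (fun j => [PySem.List.pyGetD nums (PySem.List.pyGetD boundaries j 0) 0,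
               PySem.List.pyGetD boundaries (j + 1) 0 - PySem.List.pyGetD boundaries j 0])

-- ===== PRECONDITION & SPEC =====
-- Both A and B read nums[0] unconditionally: on the empty list both raise IndexError,
-- so Pre_ excludes exactly the empty list.
def Pre_frequencies_in_a_sorted_array (nums : List Int) : Prop := nums ≠ []
instance (nums : List Int) : Decidable (Pre_frequencies_in_a_sorted_array nums) := by unfold Pre_frequencies_in_a_sorted_array; infer_instance
def pvWitness_frequencies_in_a_sorted_array : List Int := [1, 1, 2]

def Spec_frequencies_in_a_sorted_array (nums : List Int) (out : List (List Int)) : Prop := out = frequencies_in_a_sorted_array_alt nums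
instance (nums : List Int) (out : List (List Int)) : Decidable (Spec_frequencies_in_a_sorted_array nums out) := by unfold Spec_frequencies_in_a_sorted_array; infer_instance

-- ===== CLAIM (what is proved, stated in full; the proofs are below) =====
def Claim_equal_frequencies_in_a_sorted_array : Prop := ∀ (nums : List Int), Dom_frequencies_in_a_sorted_array nums → Pre_frequencies_in_a_sorted_array nums → Spec_frequencies_in_a_sorted_array nums (frequencies_in_a_sorted_array nums)

-- ===== LEMMAS AND PROOFS =====

-- count of leading elements equal to v
def pvCL (v : Int) : List Int → Nat
  | [] => 0
  | y :: ys => if y == v then pvCL v ys + 1 else 0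

-- reference run-length encoding, one run at a time
def pvRle : List Int → List (List Int)
  | [] => []
  | x :: xs => [x, 1 + (pvCL x xs : Int)] :: pvRle (xs.dropWhile (· == x))
termination_by l => l.length
decreasing_by
  simpa using Nat.lt_succ_of_le (List.length_dropWhile_le _ _)

lemma pvCL_le (v : Int) (ys : List Int) : pvCL v ys ≤ ys.length := by
  induction ys with
  | nil => simp [pvCL]
  | cons y ys ih =>
    simp only [pvCL]
    split_ifs <;> simp <;> omega

lemma pvCL_getD (v : Int) (ys : List Int) (k : Nat) (h : k < pvCL v ys) :
    ys.getD k 0 = v := by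
  induction ys generalizing k with
  | nil => simp [pvCL] at h
  | cons y ys ih =>
    simp only [pvCL] at h
    by_cases hy : y = v
    · cases k with
      | zero => simpa using hy
      | succ k =>
        simp only [hy, beq_self_eq_true, if_true] at h
        simpa using ih k (by omega)
    · simp [hy] at h
  
lemma pvCL_getD_ne (v : Int) (ys : List Int) (h : pvCL v ys < ys.length) :
    ys.getD (pvCL v ys) 0 ≠ v := by
  induction ys with
  | nil => simp at h
  | cons y ys ih =>
    simp only [pvCL] at h ⊢
    by_cases hy : y = v
    · simp only [hy, beq_self_eq_true, if_true] at h ⊢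
      simpa using ih (by simpa using h)
    · simpa [hy] using hy

lemma pvDropWhile_eq_drop (v : Int) (ys : List Int) :
    ys.dropWhile (· == v) = ys.drop (pvCL v ys) := by
  induction ys with
  | nil => rfl
  | cons y ys ih =>
    by_cases hy : y = v
    · simpa [List.dropWhile, pvCL, hy] using ih
    · have : (y == v) = false := by simp [hy]
      simp [List.dropWhile, pvCL, this]

-- ----- pairs of consecutive elements -----
def pvPairs : List Int → List (Int × Int)
  | [] => []
  | [_] => []
  | a :: b :: rest => (a, b) :: pvPairs (b :: rest)

lemma pvPairs_map_add (r : Int) (bs : List Int) :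
    pvPairs (bs.map (· + r)) = (pvPairs bs).map (fun p => (p.1 + r, p.2 + r)) := by
  induction bs with
  | nil => rfl
  | cons a bs ih =>
    cases bs with
    | nil => rfl
    | cons b rest => simpa [pvPairs] using ih

lemma pvPairs_mem_fst (bs : List Int) (p : Int × Int) (hp : p ∈ pvPairs bs) :
    p.1 ∈ bs := by
  induction bs with
  | nil => simp [pvPairs] at hp
  | cons a bs ih =>
    cases bs with
    | nil => simp [pvPairs] at hp
    | cons b rest =>
      simp only [pvPairs, List.mem_cons] at hp
      rcases hp with h | h
      · simp [h]
      · exact List.mem_cons_of_mem _ (ih h)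

-- indexed consecutive-pairs map equals the structural pvPairs map
lemma pvIdx_pairs (g : Int → Int → List Int) :
    ∀ (bs : List Int),
      (List.range (bs.length - 1)).map (fun k => g (bs.getD k 0) (bs.getD (k + 1) 0))
        = (pvPairs bs).map (fun p => g p.1 p.2) := by
  intro bs
  induction bs with
  | nil => rfl
  | cons a bs ih =>
    cases bs with
    | nil => rfl
    | cons b rest =>
      have h1 : (a :: b :: rest).length - 1 = (b :: rest).length - 1 + 1 := by
        simp
      rw [h1, List.range_succ_eq_map]
      simp only [List.map_cons, List.map_map]
      rw [pvPairs, List.map_cons]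
      refine congrArg₂ _ rfl ?_
      simpa using ih

-- ----- Nat-level change indices -----
def pvChN (l : List Int) : List Nat :=
  (List.range (l.length - 1)).filter (fun k => l.getD (k + 1) 0 != l.getD k 0)

-- every position inside the leading run holds the run's value
lemma pvRun_getD (x : Int) (xs : List Int) (k : Nat) (h : k < pvCL x xs + 1) :
    (x :: xs).getD k 0 = x := by
  cases k with
  | zero => rfl
  | succ j => simpa using pvCL_getD x xs j (by omega)

lemma pvChN_decomp_full (x : Int) (xs : List Int) (h : pvCL x xs = xs.length) :
    pvChN (x :: xs) = [] := by
  unfold pvChN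
  rw [List.filter_eq_nil_iff]
  intro k hk
  simp only [List.length_cons, Nat.add_sub_cancel, List.mem_range] at hk
  have h1 : (x :: xs).getD (k + 1) 0 = x := pvRun_getD x xs (k + 1) (by omega)
  have h2 : (x :: xs).getD k 0 = x := pvRun_getD x xs k (by omega)
  simp only [bne_iff_ne, ne_eq, Decidable.not_not]
  rw [h1, h2]

lemma pvChN_decomp (x : Int) (xs : List Int) (h : pvCL x xs < xs.length) :
    pvChN (x :: xs)
      = pvCL x xs :: (pvChN (xs.drop (pvCL x xs))).map (· + (pvCL x xs + 1)) := by
  set c := pvCL x xs with hc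
  set s := xs.length with hs
  set m' := s - c - 1 with hm'
  have hsplit : s = (c + 1) + m' := by omega
  unfold pvChN
  simp only [List.length_cons, Nat.add_sub_cancel, List.length_drop, ← hs]
  rw [show xs.length = s from rfl] at *
  rw [hsplit, List.range_add, List.filter_append, List.range_add, List.filter_append]
  have hrun : (List.range c).filter
      (fun k => (x :: xs).getD (k + 1) 0 != (x :: xs).getD k 0) = [] := by
    rw [List.filter_eq_nil_iff]
    intro k hk
    simp only [List.mem_range] at hk
    have h1 : (x :: xs).getD (k + 1) 0 = x := pvRun_getD x xs (k + 1) (by omega)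
    have h2 : (x :: xs).getD k 0 = x := pvRun_getD x xs k (by omega)
    simp only [bne_iff_ne, ne_eq, Decidable.not_not]
    rw [h1, h2]
  have hchg : ((List.range 1).map (c + ·)).filter
      (fun k => (x :: xs).getD (k + 1) 0 != (x :: xs).getD k 0) = [c] := by
    have h1 : (x :: xs).getD (c + 1) 0 = xs.getD c 0 := by simp
    have h2 : (x :: xs).getD c 0 = x := pvRun_getD x xs c (by omega)
    have hne : xs.getD c 0 ≠ x := pvCL_getD_ne x xs h
    have hmap : (List.range 1).map (c + ·) = [c] := by simp
    rw [hmap, List.filter_singleton, h1, h2]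
    have hb : (xs.getD c 0 != x) = true := bne_iff_ne.mpr hne
    simp only [List.getD_eq_getElem?_getD] at hb
    simp [hb]
  have hdropD : ∀ (j : Nat), (xs.drop c).getD j 0 = xs.getD (c + j) 0 := by
    intro j
    simp [List.getD_eq_getElem?_getD, List.getElem?_drop]
  have htail : ((List.range m').map ((c + 1) + ·)).filter
      (fun k => (x :: xs).getD (k + 1) 0 != (x :: xs).getD k 0)
      = ((List.range m').filter
          (fun j => (xs.drop c).getD (j + 1) 0 != (xs.drop c).getD j 0)).map ((c + 1) + ·) := by
    rw [List.filter_map]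
    congr 1
    apply List.filter_congr
    intro j _
    have h1 : (x :: xs).getD ((c + 1) + j + 1) 0 = xs.getD (c + (j + 1)) 0 := by
      have : (c + 1) + j + 1 = (c + (j + 1)) + 1 := by omega
      simp [this]
    have h2 : (x :: xs).getD ((c + 1) + j) 0 = xs.getD (c + j) 0 := by
      have : (c + 1) + j = (c + j) + 1 := by omega
      simp [this]
    simp only [Function.comp, h1, h2, hdropD]
  rw [hrun, hchg, htail]
  have hlen : c + 1 + m' - c - 1 = m' := by omega
  rw [hlen]
  simp only [List.nil_append, List.cons_append, List.nil_append]
  congr 1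
  apply List.map_congr_left
  intro a _
  omega

-- Int boundaries built from Nat change indices
def pvBs (l : List Int) : List Int :=
  (0 : Int) :: (pvChN l).map (fun k => ((k + 1 : Nat) : Int)) ++ [(l.length : Int)]

lemma pvGetD_drop (l : List Int) (t : Nat) (a : Int) (ha : 0 ≤ a) (d : Int) :
    PySem.List.pyGetD (l.drop t) a d = PySem.List.pyGetD l (a + t) d := by
  obtain ⟨k, rfl⟩ := Int.eq_ofNat_of_zero_le ha
  have : ((k : Int) + t) = ((k + t : Nat) : Int) := by push_cast; ring
  rw [this, PySem.List.pyGetD_natCast, PySem.List.pyGetD_natCast]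
  simp [List.getD_eq_getElem?_getD, List.getElem?_drop, Nat.add_comm t k]

lemma pvBs_nonneg (l : List Int) (a : Int) (ha : a ∈ pvBs l) : 0 ≤ a := by
  simp only [pvBs, List.cons_append, List.mem_cons, List.mem_append, List.mem_map,
    List.mem_singleton, List.not_mem_nil, or_false] at ha
  rcases ha with rfl | ⟨k, _, rfl⟩ | rfl <;> omega

-- main B-side lemma: the boundary-difference construction computes the rle
lemma pvB_main : ∀ (fuel : Nat) (nums : List Int), nums.length ≤ fuel → nums ≠ [] →
    (pvPairs (pvBs nums)).map
        (fun p => [PySem.List.pyGetD nums p.1 0, p.2 - p.1]) = pvRle nums := by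
  intro fuel
  induction fuel with
  | zero =>
    intro nums h hne
    obtain ⟨x, xs, rfl⟩ := List.exists_cons_of_ne_nil hne
    simp at h
  | succ fuel ih =>
    intro nums hlen hne
    obtain ⟨x, xs, rfl⟩ := List.exists_cons_of_ne_nil hne
    by_cases hcase : pvCL x xs < xs.length
    · -- the leading run does not exhaust the list: peel it off and recurse
      set c := pvCL x xs with hc
      set suf := xs.drop c with hsufdef
      set r : Int := ((c + 1 : Nat) : Int) with hr
      have hsuf_len : suf.length = xs.length - c := by simp [hsufdef]
      have hsuf_ne : suf ≠ [] := by
        apply List.ne_nil_of_length_pos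
        omega
      have hbs : pvBs (x :: xs) = 0 :: (pvBs suf).map (· + r) := by
        unfold pvBs
        rw [pvChN_decomp x xs hcase, ← hc, ← hsufdef]
        simp only [List.map_cons, List.map_map, List.map_append, List.cons_append,
          List.map_cons, List.nil_append]
        refine congrArg₂ _ rfl (congrArg₂ _ ?_ (congrArg₂ _ ?_ ?_))
        · rw [← hr]; omega
        · apply List.map_congr_left
          intro k _
          simp only [Function.comp_apply, ← hr]
          omega
        · simp only [List.map_cons, List.map_nil, hsuf_len, ← hr, List.length_cons]
          congr 1
          omega
      have hbs_suf : pvBs suf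
          = 0 :: ((pvChN suf).map (fun k => ((k + 1 : Nat) : Int)) ++ [(suf.length : Int)]) := rfl
      have hpairs : pvPairs (pvBs (x :: xs))
          = (0, 0 + r) :: (pvPairs (pvBs suf)).map (fun p => (p.1 + r, p.2 + r)) := by
        rw [hbs, ← pvPairs_map_add, hbs_suf]
        rfl
      rw [hpairs]
      simp only [List.map_cons, List.map_map]
      have hdrop : (x :: xs).drop (c + 1) = suf := by simp [hsufdef]
      have htail : ((pvPairs (pvBs suf)).map
            ((fun p => [PySem.List.pyGetD (x :: xs) p.1 0, p.2 - p.1]) ∘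
              (fun p => (p.1 + r, p.2 + r))))
          = (pvPairs (pvBs suf)).map (fun p => [PySem.List.pyGetD suf p.1 0, p.2 - p.1]) := by
        apply List.map_congr_left
        intro p hp
        have hp1 : 0 ≤ p.1 := pvBs_nonneg suf p.1 (pvPairs_mem_fst _ _ hp)
        simp only [Function.comp_apply]
        rw [← pvGetD_drop (x :: xs) (c + 1) p.1 hp1 0, hdrop]
        congr 1
        · congr 1
          ring
      have hlen' : xs.length + 1 ≤ fuel + 1 := by simpa using hlen
      rw [htail, ih suf (by omega) hsuf_ne, pvRle, pvDropWhile_eq_drop, ← hc, ← hsufdef]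
      simp only [PySem.List.pyGetD_zero_cons]
      have hhead : (0 : Int) + r - 0 = 1 + (pvCL x xs : Int) := by
        rw [hr]; push_cast; ring
      rw [hhead]
    · -- the whole list is one run
      have hfull : pvCL x xs = xs.length := by
        have := pvCL_le x xs
        omega
      rw [pvRle, pvDropWhile_eq_drop, hfull, List.drop_length, pvRle]
      unfold pvBs
      rw [pvChN_decomp_full x xs hfull]
      simp only [List.map_nil, List.nil_append, List.cons_append, List.length_cons]
      have harith : ((xs.length + 1 : Nat) : Int) - 0 = 1 + (xs.length : Int) := by
        push_cast; ring
      simp [pvPairs, PySem.List.pyGetD_zero_cons, harith]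
      omega

-- ----- A-side -----
lemma pvStepA_concat (bs : List (List Int)) (a : List Int) (x : Int) :
    pvStepA (bs ++ [a]) x = bs ++ pvStepA [a] x := by
  have hget : PySem.List.pyGetD (bs ++ [a]) ((PySem.List.len (bs ++ [a])) - 1) ([] : List Int) = a := by
    have h1 : (PySem.List.len (bs ++ [a])) - 1 = ((bs.length : Nat) : Int) := by
      simp [PySem.List.len_eq]
    rw [h1, PySem.List.pyGetD_natCast]
    simp [List.getD_eq_getElem?_getD]
  simp only [pvStepA, hget]
  have hget1 : PySem.List.pyGetD [a] ((PySem.List.len [a]) - 1) ([] : List Int) = a := by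
    simp [PySem.List.len_eq, PySem.List.pyGetD]
  rw [hget1]
  split_ifs with h
  · simp
  · simp

lemma pvStepA_ne_nil (l : List (List Int)) (x : Int) : pvStepA l x ≠ [] := by
  simp only [pvStepA]
  split_ifs with h <;> simp

lemma pvFoldl_pvStepA_append (xs : List Int) :
    ∀ (init acc : List (List Int)), acc ≠ [] →
      xs.foldl pvStepA (init ++ acc) = init ++ xs.foldl pvStepA acc := by
  induction xs with
  | nil => intro init acc _; simp
  | cons y ys ih =>
    intro init acc hacc
    obtain ⟨bs, a, rfl⟩ := acc.eq_nil_or_concat.resolve_left hacc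
    rw [List.concat_eq_append] at *
    simp only [List.foldl_cons]
    rw [← List.append_assoc, pvStepA_concat (init ++ bs) a y, List.append_assoc,
        ih (init) (bs ++ pvStepA [a] y)
          (by have := pvStepA_ne_nil [a] y; intro h; exact this (List.append_eq_nil_iff.mp h).2),
        ← pvStepA_concat bs a y]

-- A's forward fold from a single open run computes the rle
lemma pvA_fold (xs : List Int) : ∀ (v c : Int),
    xs.foldl pvStepA [[v, c]] = [v, c + (pvCL v xs : Int)] :: pvRle (xs.dropWhile (· == v)) := by
  induction xs with
  | nil => intro v c; simp [pvRle, pvCL, List.dropWhile]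
  | cons y ys ih =>
    intro v c
    simp only [List.foldl_cons]
    by_cases h : v = y
    · have hstep : pvStepA [[v, c]] y = [[v, c + 1]] := by
        simp [pvStepA, PySem.List.pyGetD, PySem.List.len_eq, h]
      rw [hstep, ih]
      have hcl : pvCL v (y :: ys) = pvCL v ys + 1 := by simp [pvCL, h.symm]
      have hdw : (y :: ys).dropWhile (· == v) = ys.dropWhile (· == v) := by
        simp [List.dropWhile, h.symm]
      rw [hcl, hdw]
      have : c + ((pvCL v ys + 1 : Nat) : Int) = c + 1 + (pvCL v ys : Nat) := by
        push_cast; ring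
      rw [this]
    · have hstep : pvStepA [[v, c]] y = [[v, c]] ++ [[y, 1]] := by
        simp [pvStepA, PySem.List.pyGetD, PySem.List.len_eq, h]
      rw [hstep, pvFoldl_pvStepA_append ys [[v, c]] [[y, 1]] (by simp), ih]
      have hne : (y == v) = false := by simp; exact fun hy => h hy.symm
      have hcl : pvCL v (y :: ys) = 0 := by simp [pvCL, hne]
      have hdw : (y :: ys).dropWhile (· == v) = y :: ys := by
        simp [List.dropWhile, hne]
      rw [hcl, hdw, pvRle]
      simp
  
-- port B rewritten through pvBs/pvPairs
lemma pvAlt_eq (nums : List Int) :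
    frequencies_in_a_sorted_array_alt nums
      = (pvPairs (pvBs nums)).map (fun p => [PySem.List.pyGetD nums p.1 0, p.2 - p.1]) := by
  have hfilter : (PySem.List.pyRange 1 (PySem.List.len nums) 1).filter
      (fun i => PySem.List.pyGetD nums i 0 != PySem.List.pyGetD nums (i - 1) 0)
      = (pvChN nums).map (fun k => ((k + 1 : Nat) : Int)) := by
    rw [PySem.List.len_eq, PySem.List.pyRange_one]
    have ht : (((nums.length : Nat) : Int) - 1).toNat = nums.length - 1 := by omega
    rw [ht, List.filter_map]
    unfold pvChN
    have hpred : ∀ k ∈ List.range (nums.length - 1),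
        ((fun i => PySem.List.pyGetD nums i 0 != PySem.List.pyGetD nums (i - 1) 0) ∘
          (fun k : Nat => (1 : Int) + (k : Nat))) k
        = (fun k => nums.getD (k + 1) 0 != nums.getD k 0) k := by
      intro k _
      simp only [Function.comp_apply]
      have e1 : (1 : Int) + (k : Nat) = ((k + 1 : Nat) : Int) := by push_cast; ring
      rw [e1, show ((k + 1 : Nat) : Int) - 1 = ((k : Nat) : Int) by push_cast; ring,
        PySem.List.pyGetD_natCast, PySem.List.pyGetD_natCast]
    rw [List.filter_congr hpred]
    apply List.map_congr_left
    intro k _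
    push_cast
    ring
  simp only [frequencies_in_a_sorted_array_alt]
  rw [hfilter]
  have hbound : [(0 : Int)] ++ (pvChN nums).map (fun k => ((k + 1 : Nat) : Int))
      ++ [PySem.List.len nums] = pvBs nums := by
    rw [PySem.List.len_eq]
    rfl
  rw [hbound]
  have hlen2 : PySem.List.len (pvBs nums) - 1 = (((pvBs nums).length - 1 : Nat) : Int) := by
    rw [PySem.List.len_eq]
    have : (pvBs nums).length = (pvChN nums).length + 2 := by simp [pvBs]
    omega
  rw [hlen2, PySem.List.pyRange_one]
  have ht2 : ((((pvBs nums).length - 1 : Nat) : Int) - 0).toNat = (pvBs nums).length - 1 := by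
    omega
  rw [ht2, ← pvIdx_pairs (fun a b => [PySem.List.pyGetD nums a 0, b - a]) (pvBs nums),
    List.map_map]
  apply List.map_congr_left
  intro k _
  simp only [Function.comp_apply]
  have e1 : (0 : Int) + (k : Nat) + 1 = ((k + 1 : Nat) : Int) := by push_cast; ring
  have e0 : (0 : Int) + (k : Nat) = ((k : Nat) : Int) := by ring
  rw [e1, e0, PySem.List.pyGetD_natCast, PySem.List.pyGetD_natCast]

-- ===== VERDICT (by name: the statement is the Claim_ definition above) =====
theorem frequencies_in_a_sorted_array_spec : Claim_equal_frequencies_in_a_sorted_array := by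
  intro nums _ hpre
  obtain ⟨x, xs, rfl⟩ := List.exists_cons_of_ne_nil hpre
  show frequencies_in_a_sorted_array (x :: xs) = frequencies_in_a_sorted_array_alt (x :: xs)
  unfold frequencies_in_a_sorted_array
  rw [PySem.List.foldl_pyRange_pyGetD (xs := x :: xs) (a := 1) (d := 0)
      (f := pvStepA) (init := [[PySem.List.pyGetD (x :: xs) 0 0, 1]]) (by norm_num)]
  simp only [PySem.List.pyGetD_zero_cons]
  have hd : ((x :: xs).drop (1 : Int).toNat) = xs := rfl
  rw [hd, pvA_fold, pvAlt_eq _, pvB_main (x :: xs).length (x :: xs) le_rfl hpre, pvRle,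
     pvDropWhile_eq_drop]
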